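-- pv_equiv track=rewrite | github.com/ryan258/ai-ethics-comparator | lib/reporting.py | _matches_required_structure
-- ===== SOURCE A (Python) =====
-- def _matches_required_structure(explanation: object, expected_labels: tuple[str, ...]) -> bool:
--     if not expected_labels:
--         return True
--     lines = [line.strip() for line in str(explanation or "").splitlines() if line.strip()]
--     label_index = 0
--     for line in lines:
--         if line.startswith(expected_labels[label_index]):
--             label_index += 1
--             if label_index == len(expected_labels):
--                 return True
--     return label_index == len(expected_labels)
-- ===== SOURCE B (Python) =====
-- def _matches_required_structure(explanation: object, expected_labels: tuple[str, ...]) -> bool: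
--     # Backward greedy: scan the stripped non-empty lines from the END, matching
--     # labels last-to-first (picks the LAST occurrence of each label, where A picks
--     # the first).  Both decide the same thing: whether the labels occur as prefixes
--     # of some increasing subsequence of lines (standard greedy-subsequence fact).
--     lines = [line.strip() for line in str(explanation or "").splitlines() if line.strip()]
--     pending = list(reversed(expected_labels))
--     for line in reversed(lines):
--         if pending and line.startswith(pending[0]):
--             pending = pending[1:]
--     return not pending
-- ===== Notes on version B (the rewrite author's own statement) =====
-- stated objective: alternative
-- what changed: Replaces A's forward greedy scan (first matching line per label) by a backward greedy scan over reversed lines matching labels last-to-first (last occurrences); both decide the same subsequence-of-prefix-matches property, proved via an embedding characterisation.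
import Mathlib
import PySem

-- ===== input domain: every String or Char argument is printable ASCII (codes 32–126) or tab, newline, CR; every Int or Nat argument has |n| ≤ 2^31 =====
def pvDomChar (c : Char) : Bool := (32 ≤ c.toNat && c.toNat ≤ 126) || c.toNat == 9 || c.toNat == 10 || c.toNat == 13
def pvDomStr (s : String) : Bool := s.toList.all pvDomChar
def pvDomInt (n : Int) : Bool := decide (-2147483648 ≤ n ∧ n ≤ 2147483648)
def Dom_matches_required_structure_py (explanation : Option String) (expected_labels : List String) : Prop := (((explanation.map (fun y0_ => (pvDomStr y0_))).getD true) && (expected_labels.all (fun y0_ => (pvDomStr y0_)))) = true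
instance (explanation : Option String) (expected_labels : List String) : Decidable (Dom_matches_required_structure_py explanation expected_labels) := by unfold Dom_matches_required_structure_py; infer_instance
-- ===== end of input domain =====

-- B scans the lines BACKWARD, matching labels last-to-first (last occurrences), where A scans
-- forward matching first occurrences; both decide the same subsequence property (alternative).

-- ===== PORT A =====
-- the loop 'for line in lines: ...' with the mutable label_index and early return
def pvMatchA_go (labels : List String) (idx : Nat) : List String → Bool
  | [] => decide (idx = labels.length)
  | l :: rest =>
    if PySem.Str.startswith l (labels.getD idx "") then
      if idx + 1 = labels.length then true
      else pvMatchA_go labels (idx + 1) rest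
    else pvMatchA_go labels idx rest

def matches_required_structure_py (explanation : Option String) (expected_labels : List String) : Bool :=
  if expected_labels = [] then true
  else
    -- [line.strip() for line in str(explanation or "").splitlines() if line.strip()]
    let lines := (PySem.Str.splitlines (explanation.getD "")).filterMap
      (fun line => let s := PySem.Str.strip line; if s = "" then none else some s)
    pvMatchA_go expected_labels 0 lines

-- ===== PORT B =====
-- one step of B's loop body: 'if pending and line.startswith(pending[0]): pending = pending[1:]'
def pvStepB (pending : List String) (line : String) : List String :=
  match pending with
  | [] => []
  | lab :: rest => if PySem.Str.startswith line lab then rest else lab :: rest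

def matches_required_structure_py_alt (explanation : Option String) (expected_labels : List String) : Bool :=
  let lines := (PySem.Str.splitlines (explanation.getD "")).filterMap
    (fun line => let s := PySem.Str.strip line; if s = "" then none else some s)
  -- 'for line in reversed(lines): ...' over pending = list(reversed(expected_labels)); 'return not pending'
  (lines.reverse.foldl pvStepB expected_labels.reverse).isEmpty

-- ===== PRECONDITION & SPEC =====
def Spec_matches_required_structure_py (explanation : Option String) (expected_labels : List String) (out : Bool) : Prop := out = matches_required_structure_py_alt explanation expected_labels
instance (explanation : Option String) (expected_labels : List String) (out : Bool) : Decidable (Spec_matches_required_structure_py explanation expected_labels out) := by unfold Spec_matches_required_structure_py; infer_instance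

-- ===== CLAIM (what is proved, stated in full; the proofs are below) =====
def Claim_equal_matches_required_structure_py : Prop := ∀ (explanation : Option String) (expected_labels : List String), Dom_matches_required_structure_py explanation expected_labels → Spec_matches_required_structure_py explanation expected_labels (matches_required_structure_py explanation expected_labels)

-- ===== LEMMAS AND PROOFS =====

-- forward greedy subsequence matcher (the algorithmic content of A)
def pvGreedy : List String → List String → Bool
  | _, [] => true
  | [], _ :: _ => false
  | l :: ls, lab :: labs =>
    if PySem.Str.startswith l lab then pvGreedy ls labs else pvGreedy ls (lab :: labs)

-- 'labs occurs as prefixes of an increasing subsequence of ls'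
inductive pvEmb : List String → List String → Prop
  | nil (ls : List String) : pvEmb ls []
  | cons {l lab : String} {ls labs : List String} :
      PySem.Str.startswith l lab = true → pvEmb ls labs → pvEmb (l :: ls) (lab :: labs)
  | skip {l : String} {ls labs : List String} : pvEmb ls labs → pvEmb (l :: ls) labs

theorem pvEmb_tail {ls labs : List String} {lab : String} (h : pvEmb ls (lab :: labs)) :
    pvEmb ls labs := by
  generalize hx : (lab :: labs) = x at h
  induction h with
  | nil => cases hx
  | cons hr h ih => cases hx; exact pvEmb.skip h
  | skip h ih => exact pvEmb.skip (ih hx)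

theorem pvGreedy_iff_emb : ∀ (ls labs : List String), pvGreedy ls labs = true ↔ pvEmb ls labs := by
  intro ls
  induction ls with
  | nil =>
    intro labs
    cases labs with
    | nil => simp [pvGreedy]; exact pvEmb.nil []
    | cons lab rest =>
      constructor
      · intro h; simp [pvGreedy] at h
      · intro h; cases h
  | cons l ls ih =>
    intro labs
    cases labs with
    | nil => simp [pvGreedy]; exact pvEmb.nil _
    | cons lab rest =>
      by_cases hr : PySem.Str.startswith l lab = true
      · simp only [pvGreedy, hr, if_true]
        constructor
        · intro h; exact pvEmb.cons hr ((ih rest).1 h)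
        · intro h
          cases h with
          | cons _ h2 => exact (ih rest).2 h2
          | skip h2 => exact (ih rest).2 (pvEmb_tail h2)
      · simp only [pvGreedy, hr]
        constructor
        · intro h; exact pvEmb.skip ((ih (lab :: rest)).1 h)
        · intro h
          cases h with
          | cons hr2 _ => exact absurd hr2 hr
          | skip h2 => exact (ih (lab :: rest)).2 h2

theorem pvEmb_snoc_skip {ls labs : List String} (l : String) (h : pvEmb ls labs) :
    pvEmb (ls ++ [l]) labs := by
  induction h with
  | nil => exact pvEmb.nil _
  | cons hr _ ih => exact pvEmb.cons hr ih
  | skip _ ih => exact pvEmb.skip ih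

theorem pvEmb_singleton {l lab : String} (hr : PySem.Str.startswith l lab = true) :
    ∀ (ls : List String), pvEmb (ls ++ [l]) [lab] := by
  intro ls
  induction ls with
  | nil => exact pvEmb.cons hr (pvEmb.nil [])
  | cons x xs ih => exact pvEmb.skip ih

theorem pvEmb_snoc_cons {ls labs : List String} {l lab : String}
    (hr : PySem.Str.startswith l lab = true) (h : pvEmb ls labs) :
    pvEmb (ls ++ [l]) (labs ++ [lab]) := by
  induction h with
  | nil ls' => exact pvEmb_singleton hr ls'
  | cons hr2 _ ih => exact pvEmb.cons hr2 ih
  | skip _ ih => exact pvEmb.skip ih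

theorem pvEmb_reverse_of {ls labs : List String} (h : pvEmb ls labs) :
    pvEmb ls.reverse labs.reverse := by
  induction h with
  | nil => exact pvEmb.nil _
  | cons hr _ ih => simpa using pvEmb_snoc_cons hr ih
  | skip _ ih => simpa using pvEmb_snoc_skip _ ih

theorem pvEmb_reverse_iff (ls labs : List String) :
    pvEmb ls.reverse labs.reverse ↔ pvEmb ls labs := by
  constructor
  · intro h; simpa using pvEmb_reverse_of h
  · exact pvEmb_reverse_of

theorem pvGreedy_reverse (ls labs : List String) :
    pvGreedy ls.reverse labs.reverse = pvGreedy ls labs := by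
  rw [Bool.eq_iff_iff, pvGreedy_iff_emb, pvGreedy_iff_emb]
  exact pvEmb_reverse_iff ls labs

-- B's fold succeeds (empties the pending list) exactly when the forward greedy on the
-- same (reversed) data succeeds
theorem pvFoldB_eq_greedy : ∀ (ls labs : List String),
    (ls.foldl pvStepB labs).isEmpty = pvGreedy ls labs := by
  intro ls
  induction ls with
  | nil =>
    intro labs
    cases labs with
    | nil => simp [pvGreedy]
    | cons lab rest => simp [pvGreedy]
  | cons l ls ih =>
    intro labs
    cases labs with
    | nil =>
      have h0 : ∀ xs : List String, xs.foldl pvStepB [] = [] := by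
        intro xs; induction xs with
        | nil => rfl
        | cons x xs ihx => simpa [pvStepB] using ihx
      simp [pvGreedy, h0]
    | cons lab rest =>
      cases hr : PySem.Chars.startswith l.toList lab.toList <;>
        simp [pvGreedy, pvStepB, PySem.Str.startswith, hr, ih]

-- A's single pass with label_index idx computes the forward greedy on labels.drop idx
theorem pvMatchA_eq_greedy (lines : List String) : ∀ (labels : List String) (idx : Nat),
    idx < labels.length → pvMatchA_go labels idx lines = pvGreedy lines (labels.drop idx) := by
  induction lines with
  | nil =>
    intro labels idx h
    rw [List.drop_eq_getElem_cons h]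
    simp [pvMatchA_go, pvGreedy]
    omega
  | cons l rest ih =>
    intro labels idx h
    rw [List.drop_eq_getElem_cons h]
    by_cases hs : PySem.Chars.startswith l.toList labels[idx].toList = true
    · by_cases hlen : idx + 1 = labels.length
      · have hdrop : labels.drop (idx + 1) = [] := by
          apply List.drop_eq_nil_of_le; omega
        have hg : ∀ xs : List String, pvGreedy xs ([] : List String) = true := by
          intro xs; cases xs <;> rfl
        simp [pvMatchA_go, pvGreedy, PySem.Str.startswith, List.getD_eq_getElem?_getD,
          List.getElem?_eq_getElem h, hs, hlen, hg]
      · have h' : idx + 1 < labels.length := by omega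
        simp only [pvMatchA_go, pvGreedy, PySem.Str.startswith, List.getD_eq_getElem?_getD,
          List.getElem?_eq_getElem h, Option.getD_some, hs, if_true, hlen, if_false]
        rw [ih labels (idx + 1) h']
    · simp only [pvMatchA_go, pvGreedy, PySem.Str.startswith, List.getD_eq_getElem?_getD,
        List.getElem?_eq_getElem h, Option.getD_some, hs]
      rw [ih labels idx h, List.drop_eq_getElem_cons h]
      simp

-- ===== VERDICT (by name: the statement is the Claim_ definition above) =====
theorem matches_required_structure_py_spec : Claim_equal_matches_required_structure_py := by
  intro explanation expected_labels _
  unfold Spec_matches_required_structure_py matches_required_structure_py matches_required_structure_py_alt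
  rw [pvFoldB_eq_greedy, pvGreedy_reverse]
  cases expected_labels with
  | nil => simp [pvGreedy]
  | cons lab rest =>
    simp only [reduceCtorEq, if_false]
    exact pvMatchA_eq_greedy _ (lab :: rest) 0 (by simp)
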